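-- pv_equiv track=rewrite | github.com/RILAB/argprep | scripts/check_split_coverage.py | overlap_bp
-- ===== SOURCE A (Python) =====
-- from typing import Dict, List, TextIO, Tuple
--
-- def merge_intervals(intervals: List[Tuple[int, int]]) -> List[Tuple[int, int]]:
--     # Coalesce overlapping/adjacent intervals to simplify coverage math.
--     if not intervals:
--         return []
--     intervals.sort(key=lambda x: (x[0], x[1]))
--     merged: List[Tuple[int, int]] = []
--     cur_s, cur_e = intervals[0]
--     for s, e in intervals[1:]:
--         if s <= cur_e:
--             cur_e = max(cur_e, e)
--         else:
--             merged.append((cur_s, cur_e))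
--             cur_s, cur_e = s, e
--     merged.append((cur_s, cur_e))
--     return merged
--
-- def overlap_bp(a: List[Tuple[int, int]], b: List[Tuple[int, int]]) -> int:
--     # Compute total bp overlap between two interval sets.
--     i = j = 0
--     total = 0
--     a = merge_intervals(a)
--     b = merge_intervals(b)
--     while i < len(a) and j < len(b):
--         a_s, a_e = a[i]
--         b_s, b_e = b[j]
--         if a_e <= b_s:
--             i += 1
--             continue
--         if b_e <= a_s:
--             j += 1
--             continue
--         total += min(a_e, b_e) - max(a_s, b_s)
--         if a_e <= b_e:
--             i += 1
--         else:
--             j += 1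
--     return total
-- ===== SOURCE B (Python) =====
-- # Return-value equivalent re-implementation; mirrors A's side effect of sorting both input lists in place.
-- def _coalesce(iv):
--     # iv must already be sorted by (start, end); coalesce into blocks by updating the last block.
--     out = []
--     for s, e in iv:
--         if out and s <= out[-1][1]:
--             if e > out[-1][1]:
--                 out[-1] = (out[-1][0], e)
--         else:
--             out.append((s, e))
--     return out
--
-- def overlap_bp(a, b):
--     a.sort(key=lambda x: (x[0], x[1]))
--     b.sort(key=lambda x: (x[0], x[1]))
--     blocks_a = _coalesce(a)
--     blocks_b = _coalesce(b)
--     total = 0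
--     j0 = 0
--     for s, e in blocks_a:
--         # retire b-blocks that end at or before this (and hence every later) a-block's start
--         while j0 < len(blocks_b) and blocks_b[j0][1] <= s:
--             j0 += 1
--         j = j0
--         while j < len(blocks_b) and blocks_b[j][0] < e:
--             ys, ye = blocks_b[j]
--             if ye > s:
--                 total += min(e, ye) - max(s, ys)
--             j += 1
--     return total
-- ===== Notes on version B (the rewrite author's own statement) =====
-- stated objective: alternative
-- what changed: A merges each list with a cursor-carrying fold and then runs an index two-pointer over the two merged lists; B coalesces each sorted list by updating the last emitted block and then, per a-block, retires expired b-blocks and scans the b-blocks that start before the a-block ends, summing pairwise overlaps (like A, it sorts both argument lists in place).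
import Mathlib
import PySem

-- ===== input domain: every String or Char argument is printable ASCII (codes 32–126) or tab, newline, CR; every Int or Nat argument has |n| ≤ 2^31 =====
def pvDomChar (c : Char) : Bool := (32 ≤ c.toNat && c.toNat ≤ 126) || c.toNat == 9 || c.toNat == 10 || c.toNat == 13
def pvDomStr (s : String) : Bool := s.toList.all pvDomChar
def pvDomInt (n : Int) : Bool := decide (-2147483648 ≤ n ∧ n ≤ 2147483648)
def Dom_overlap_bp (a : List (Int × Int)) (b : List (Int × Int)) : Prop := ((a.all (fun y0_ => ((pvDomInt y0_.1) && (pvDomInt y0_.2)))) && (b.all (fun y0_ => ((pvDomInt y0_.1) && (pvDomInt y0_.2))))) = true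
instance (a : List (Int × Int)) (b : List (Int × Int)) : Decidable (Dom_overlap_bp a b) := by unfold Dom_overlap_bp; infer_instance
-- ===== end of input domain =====

-- B replaces A's cursor-carrying merge and index two-pointer by a last-block-updating coalesce
-- and a linear retire-and-scan over the merged blocks (alternative decomposition, same cost);
-- like A, B sorts both argument lists in place (the theorems are about the return value).


-- ===== PORT A =====
-- merge_intervals: sort by (x[0], x[1]), then fold carrying (merged, cur_s, cur_e)
def mergeStepA (acc : List (Int × Int) × Int × Int) (se : Int × Int) : List (Int × Int) × Int × Int :=
  if se.1 ≤ acc.2.2 then (acc.1, acc.2.1, max acc.2.2 se.2)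
  else (acc.1 ++ [(acc.2.1, acc.2.2)], se.1, se.2)

def mergeIntervals (intervals : List (Int × Int)) : List (Int × Int) :=
  match intervals with
  | [] => []
  | _ :: _ =>
    match PySem.List.sorted2 intervals (fun x => x.1) (fun x => x.2) with
    | [] => []  -- unreachable: sorting a nonempty list is nonempty
    | c :: rest =>
      let st := rest.foldl mergeStepA ([], c.1, c.2)
      st.1 ++ [(st.2.1, st.2.2)]

-- the while loop on indices i, j; only the suffixes a[i:], b[j:] are ever consulted
def owLoop : List (Int × Int) → List (Int × Int) → Int → Int
  | (a_s, a_e) :: as', (b_s, b_e) :: bs', total =>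
    if a_e ≤ b_s then owLoop as' ((b_s, b_e) :: bs') total
    else if b_e ≤ a_s then owLoop ((a_s, a_e) :: as') bs' total
    else
      let total := total + (min a_e b_e - max a_s b_s)
      if a_e ≤ b_e then owLoop as' ((b_s, b_e) :: bs') total
      else owLoop ((a_s, a_e) :: as') bs' total
  | _, _, total => total
termination_by a b _ => a.length + b.length

def overlap_bp (a : List (Int × Int)) (b : List (Int × Int)) : Int :=
  owLoop (mergeIntervals a) (mergeIntervals b) 0

-- ===== PORT B =====
-- _coalesce: fold over the (already sorted) list, updating the last emitted block;
-- the Python list `out` is kept here in reverse (append / modify out[-1] = operate on the head)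
def coalStepB (out : List (Int × Int)) (se : Int × Int) : List (Int × Int) :=
  match out with
  | (ls, le) :: rest =>
    if se.1 ≤ le then (if le < se.2 then (ls, se.2) :: rest else (ls, le) :: rest)
    else se :: (ls, le) :: rest
  | [] => [se]

def coalesce (iv : List (Int × Int)) : List (Int × Int) :=
  (iv.foldl coalStepB []).reverse

-- the inner while loop: walk blocks_b from j0 while the block starts before e
def rowScan (s e : Int) : List (Int × Int) → Int
  | [] => 0
  | (ys, ye) :: t =>
    if ys < e then (if s < ye then min e ye - max s ys else 0) + rowScan s e t else 0

-- the outer for loop; the suffix bb is blocks_b[j0:], advanced by the retiring while-loop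
def altLoop : List (Int × Int) → List (Int × Int) → Int
  | [], _ => 0
  | (s, e) :: xs, bb =>
    let bb' := bb.dropWhile (fun y => y.2 ≤ s)
    rowScan s e bb' + altLoop xs bb'

def overlap_bp_alt (a : List (Int × Int)) (b : List (Int × Int)) : Int :=
  let sa := PySem.List.sorted2 a (fun x => x.1) (fun x => x.2)
  let sb := PySem.List.sorted2 b (fun x => x.1) (fun x => x.2)
  altLoop (coalesce sa) (coalesce sb)

-- ===== PRECONDITION & SPEC =====
def Spec_overlap_bp (a : List (Int × Int)) (b : List (Int × Int)) (out : Int) : Prop := out = overlap_bp_alt a b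
instance (a : List (Int × Int)) (b : List (Int × Int)) (out : Int) : Decidable (Spec_overlap_bp a b out) := by unfold Spec_overlap_bp; infer_instance

-- ===== CLAIM (what is proved, stated in full; the proofs are below) =====
def Claim_equal_overlap_bp : Prop := ∀ (a : List (Int × Int)) (b : List (Int × Int)), Dom_overlap_bp a b → Spec_overlap_bp a b (overlap_bp a b)

-- ===== LEMMAS AND PROOFS =====

-- the common ground between the two programs: the amount A's two-pointer loop adds for the
-- pair of merged blocks x, y (possibly negative when a block is degenerate, end < start)
def contrib (x y : Int × Int) : Int :=
  if y.1 < x.2 ∧ x.1 < y.2 then min x.2 y.2 - max x.1 y.1 else 0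

def rowSum (x : Int × Int) (bs : List (Int × Int)) : Int := (bs.map (contrib x)).sum

def pairSum (as' bs : List (Int × Int)) : Int := (as'.map (fun x => rowSum x bs)).sum

-- well-formedness of a merged list: starts nondecreasing, each block ends before the next starts
def Good (l : List (Int × Int)) : Prop := List.IsChain (fun p q : Int × Int => p.1 ≤ q.1 ∧ p.2 < q.1) l

theorem good_head_tail {x : Int × Int} {t : List (Int × Int)} (h : Good (x :: t)) :
    ∀ y ∈ t, x.1 ≤ y.1 ∧ x.2 < y.1 := by
  unfold Good at h
  induction t generalizing x with
  | nil => intro y hy; cases hy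
  | cons z t ih =>
    intro y hy
    rw [List.isChain_cons] at h
    have h1 : x.1 ≤ z.1 ∧ x.2 < z.1 := h.1 z rfl
    rcases List.mem_cons.mp hy with rfl | hy
    · exact h1
    · have h2 := ih (x := z) h.2 y hy
      exact ⟨le_trans h1.1 h2.1, lt_of_lt_of_le h1.2 h2.1⟩

-- sorted2's comparator is the strict lexicographic order on Int × Int
theorem before_eq :
    (fun a b : Int × Int => decide (a.1 < b.1) || !decide (b.1 < a.1) && decide (a.2 < b.2))
      = fun a b : Int × Int => decide (toLex a < toLex b) := by
  funext a b
  rw [Bool.eq_iff_iff]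
  simp only [Bool.or_eq_true, Bool.and_eq_true, Bool.not_eq_eq_eq_not,
    Bool.not_true, decide_eq_true_eq, decide_eq_false_iff_not, Prod.Lex.lt_iff, ofLex_toLex]
  constructor <;> intro h <;> omega

theorem foldl_insertBy_pairwise {α κ : Type} [LinearOrder κ] (key : α → κ) :
    ∀ (xs acc : List α), List.Pairwise (fun a b => key a ≤ key b) acc →
      List.Pairwise (fun a b => key a ≤ key b)
        (xs.foldl (fun acc x => PySem.List.insertBy (fun a b => decide (key a < key b)) x acc) acc) := by
  intro xs
  induction xs with
  | nil => intro acc h; exact h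
  | cons x xs ih =>
    intro acc h
    exact ih _ (PySem.List.insertBy_pairwise_le key x acc h)

-- the sorted list has nondecreasing starts
theorem sorted2_starts (l : List (Int × Int)) :
    List.Pairwise (fun a b : Int × Int => a.1 ≤ b.1)
      (PySem.List.sorted2 l (fun x => x.1) (fun x => x.2)) := by
  have h : PySem.List.sorted2 l (fun x => x.1) (fun x => x.2)
      = l.foldl (fun acc x => PySem.List.insertBy
          (fun a b : Int × Int => decide (toLex a < toLex b)) x acc) [] := by
    show List.foldl _ [] l = _
    rw [← before_eq]
    rfl
  rw [h]
  have h2 := foldl_insertBy_pairwise (fun p : Int × Int => toLex p) l [] (by simp)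
  refine h2.imp ?_
  intro a b hab
  rcases Prod.Lex.le_iff.mp hab with h3 | h3
  · exact le_of_lt h3
  · exact le_of_eq h3.1

-- A's merge fold and B's coalesce fold walk through the same states
theorem foldAgree : ∀ (rest : List (Int × Int)) (merged : List (Int × Int)) (cs ce : Int),
    rest.foldl coalStepB ((cs, ce) :: merged.reverse)
      = (((rest.foldl mergeStepA (merged, cs, ce)).2.1,
          (rest.foldl mergeStepA (merged, cs, ce)).2.2)
          :: (rest.foldl mergeStepA (merged, cs, ce)).1.reverse) := by
  intro rest
  induction rest with
  | nil => intro merged cs ce; rfl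
  | cons se rest ih =>
    intro merged cs ce
    obtain ⟨s, e⟩ := se
    by_cases h1 : s ≤ ce
    · have hB : coalStepB ((cs, ce) :: merged.reverse) (s, e)
          = (cs, max ce e) :: merged.reverse := by
        simp only [coalStepB, h1, if_pos]
        by_cases h2 : ce < e
        · simp [h2, max_eq_right (le_of_lt h2)]
        · simp [h2, max_eq_left (le_of_not_gt h2)]
      have hA : mergeStepA (merged, cs, ce) (s, e) = (merged, cs, max ce e) := by
        simp [mergeStepA, h1]
      simp only [List.foldl_cons, hB, hA]
      exact ih merged cs (max ce e)
    · have hB : coalStepB ((cs, ce) :: merged.reverse) (s, e)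
          = (s, e) :: (merged ++ [(cs, ce)]).reverse := by
        simp [coalStepB, h1]
      have hA : mergeStepA (merged, cs, ce) (s, e) = (merged ++ [(cs, ce)], s, e) := by
        simp [mergeStepA, h1]
      simp only [List.foldl_cons, hB, hA]
      exact ih (merged ++ [(cs, ce)]) s e

theorem merge_eq_coalesce (l : List (Int × Int)) :
    mergeIntervals l = coalesce (PySem.List.sorted2 l (fun x => x.1) (fun x => x.2)) := by
  cases l with
  | nil => rfl
  | cons x xs =>
    unfold mergeIntervals coalesce
    cases hs : PySem.List.sorted2 (x :: xs) (fun x => x.1) (fun x => x.2) with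
    | nil =>
      exfalso
      have := (PySem.List.sorted2_perm (x :: xs) (fun x => x.1) (fun x => x.2) false).length_eq
      rw [hs] at this
      simp at this
    | cons c rest =>
      simp only [List.foldl_cons]
      have h0 : coalStepB [] c = (c.1, c.2) :: ([] : List (Int × Int)).reverse := by
        simp [coalStepB]
      rw [h0, foldAgree]
      simp

-- edges into the last block do not look at its end
theorem good_snoc_end (m : List (Int × Int)) (c x y : Int) (h : Good (m ++ [(c, x)])) :
    Good (m ++ [(c, y)]) := by
  unfold Good at *
  rw [List.isChain_append] at h ⊢
  refine ⟨h.1, by simp, ?_⟩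
  intro p hp q hq
  simp only [List.head?_cons, Option.mem_some_iff] at hq
  subst hq
  exact h.2.2 p hp (c, x) rfl

-- A's merge fold keeps its output well-formed
theorem goodA : ∀ (rest : List (Int × Int)) (merged : List (Int × Int)) (cs ce : Int),
    List.IsChain (fun p q : Int × Int => p.1 ≤ q.1) ((cs, ce) :: rest) →
    Good (merged ++ [(cs, ce)]) →
    Good ((rest.foldl mergeStepA (merged, cs, ce)).1
          ++ [((rest.foldl mergeStepA (merged, cs, ce)).2.1,
               (rest.foldl mergeStepA (merged, cs, ce)).2.2)]) := by
  intro rest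
  induction rest with
  | nil => intro merged cs ce _ hg; exact hg
  | cons se rest ih =>
    intro merged cs ce hchain hg
    obtain ⟨s, e⟩ := se
    rw [List.isChain_cons] at hchain
    have hcs : cs ≤ s := hchain.1 (s, e) (by simp)
    have htail := hchain.2
    by_cases h1 : s ≤ ce
    · have hA : mergeStepA (merged, cs, ce) (s, e) = (merged, cs, max ce e) := by
        simp [mergeStepA, h1]
      simp only [List.foldl_cons, hA]
      apply ih
      · rw [List.isChain_cons] at htail ⊢
        exact ⟨fun y hy => le_trans hcs (htail.1 y hy), htail.2⟩
      · exact good_snoc_end merged cs ce (max ce e) hg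
    · have hA : mergeStepA (merged, cs, ce) (s, e) = (merged ++ [(cs, ce)], s, e) := by
        simp [mergeStepA, h1]
      simp only [List.foldl_cons, hA]
      apply ih _ _ _ htail
      show Good ((merged ++ [(cs, ce)]) ++ [(s, e)])
      unfold Good at hg ⊢
      rw [List.isChain_append]
      refine ⟨hg, by simp, ?_⟩
      intro p hp q hq
      simp only [List.head?_cons, Option.mem_some_iff] at hq
      subst hq
      have hlast : p = (cs, ce) := by
        rw [List.getLast?_append] at hp
        exact (by simpa using hp : (cs, ce) = p).symm
      subst hlast
      exact ⟨hcs, by omega⟩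

theorem good_merge (l : List (Int × Int)) : Good (mergeIntervals l) := by
  cases l with
  | nil => exact List.IsChain.nil
  | cons x xs =>
    unfold mergeIntervals
    cases hs : PySem.List.sorted2 (x :: xs) (fun x => x.1) (fun x => x.2) with
    | nil => exact List.IsChain.nil
    | cons c rest =>
      simp only
      apply goodA
      · have := (sorted2_starts (x :: xs)).isChain
        rw [hs] at this
        simpa using this
      · simp [Good]

theorem pairSum_cons (x : Int × Int) (A bs : List (Int × Int)) :
    pairSum (x :: A) bs = rowSum x bs + pairSum A bs := by simp [pairSum]

theorem rowSum_cons (x y : Int × Int) (bs : List (Int × Int)) :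
    rowSum x (y :: bs) = contrib x y + rowSum x bs := by simp [rowSum]

theorem pairSum_cons_right (A : List (Int × Int)) (y : Int × Int) (bs : List (Int × Int)) :
    pairSum A (y :: bs) = (A.map (fun x => contrib x y)).sum + pairSum A bs := by
  induction A with
  | nil => simp [pairSum]
  | cons a A ih =>
    simp only [pairSum_cons, ih, rowSum_cons, List.map_cons, List.sum_cons]
    ring

theorem rowSum_zero (x : Int × Int) (bs : List (Int × Int))
    (h : ∀ y ∈ bs, contrib x y = 0) : rowSum x bs = 0 := by
  apply List.sum_eq_zero
  intro z hz
  obtain ⟨y, hy, rfl⟩ := List.mem_map.mp hz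
  exact h y hy

-- A's two-pointer loop computes the pairwise sum over two well-formed lists
theorem owLoop_eq (as' bs : List (Int × Int)) (total : Int) (ha : Good as') (hb : Good bs) :
    owLoop as' bs total = total + pairSum as' bs := by
  revert ha hb
  induction as', bs, total using owLoop.induct with
  | case1 a_s a_e as' b_s b_e bs' total h ih =>
    intro ha hb
    rw [owLoop]
    simp only [h, if_pos]
    rw [ih ha.tail hb, pairSum_cons, rowSum_zero]
    · ring
    · intro y hy
      unfold contrib
      rcases List.mem_cons.mp hy with rfl | hy
      · rw [if_neg]; simp only [not_and]; omega
      · have := good_head_tail hb y hy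
        rw [if_neg]
        simp only at this ⊢
        omega
  | case2 a_s a_e as' b_s b_e bs' total h1 h2 ih =>
    intro ha hb
    rw [owLoop]
    simp only [h1, h2, ite_false, ite_true]
    rw [ih ha hb.tail, pairSum_cons_right, List.sum_eq_zero]
    · ring
    · intro z hz
      obtain ⟨x, hx, rfl⟩ := List.mem_map.mp hz
      unfold contrib
      rcases List.mem_cons.mp hx with rfl | hx
      · rw [if_neg]; simp only; omega
      · have := good_head_tail ha x hx
        rw [if_neg]
        simp only at this ⊢
        omega
  | case3 a_s a_e as' b_s b_e bs' total h1 h2 total1 h3 ih =>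
    intro ha hb
    rw [owLoop]
    simp only [h1, h2, h3, ite_false, ite_true]
    rw [ih ha.tail hb, pairSum_cons, rowSum_cons]
    have hc : contrib (a_s, a_e) (b_s, b_e) = min a_e b_e - max a_s b_s := by
      unfold contrib; rw [if_pos]; constructor <;> simp <;> omega
    have hz : rowSum (a_s, a_e) bs' = 0 := by
      apply rowSum_zero
      intro y hy
      have := good_head_tail hb y hy
      unfold contrib
      rw [if_neg]
      simp only at this ⊢
      omega
    rw [hc, hz]
    ring
  | case4 a_s a_e as' b_s b_e bs' total h1 h2 total1 h3 ih =>
    intro ha hb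
    rw [owLoop]
    simp only [h1, h2, h3, ite_false]
    rw [ih ha hb.tail, pairSum_cons_right]
    have hrow : ((((a_s, a_e) :: as').map (fun x => contrib x (b_s, b_e))).sum)
        = min a_e b_e - max a_s b_s := by
      simp only [List.map_cons, List.sum_cons]
      have hc : contrib (a_s, a_e) (b_s, b_e) = min a_e b_e - max a_s b_s := by
        unfold contrib; rw [if_pos]; constructor <;> simp <;> omega
      rw [hc, List.sum_eq_zero]
      · ring
      · intro z hz
        obtain ⟨x, hx, rfl⟩ := List.mem_map.mp hz
        have := good_head_tail ha x hx
        unfold contrib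
        rw [if_neg]
        simp only at this ⊢
        omega
    rw [hrow]
    ring
  | case5 as' bs total h =>
    intro ha hb
    rw [owLoop]
    · cases as' with
      | nil => simp [pairSum]
      | cons x as' =>
        cases bs with
        | nil => simp [pairSum, rowSum]
        | cons y bs' => exact absurd (h x.1 x.2 as' y.1 y.2 bs' rfl rfl) (fun f => f)
    · exact h

theorem rowSum_append (x : Int × Int) (l1 l2 : List (Int × Int)) :
    rowSum x (l1 ++ l2) = rowSum x l1 + rowSum x l2 := by
  simp [rowSum]

theorem pairSum_append_right (A l1 l2 : List (Int × Int)) :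
    pairSum A (l1 ++ l2) = pairSum A l1 + pairSum A l2 := by
  induction A with
  | nil => simp [pairSum]
  | cons a A ih => simp only [pairSum_cons, rowSum_append, ih]; ring

-- B's inner scan over a well-formed list equals the row sum over it
theorem rowScan_eq (s e : Int) (bs : List (Int × Int)) (hb : Good bs) :
    rowScan s e bs = rowSum (s, e) bs := by
  induction bs with
  | nil => rfl
  | cons y t ih =>
    obtain ⟨ys, ye⟩ := y
    rw [rowScan]
    by_cases h1 : ys < e
    · rw [if_pos h1, ih hb.tail]
      simp only [rowSum, List.map_cons, List.sum_cons]
      congr 1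
      unfold contrib
      by_cases h2 : s < ye
      · rw [if_pos h2]
        rw [if_pos (by constructor <;> simpa)]
      · rw [if_neg h2]
        rw [if_neg (by simp only [not_and]; intro; simpa using h2)]
    · rw [if_neg h1]
      symm
      apply rowSum_zero
      intro z hz
      unfold contrib
      rcases List.mem_cons.mp hz with rfl | hz
      · rw [if_neg]; simp only [not_and]; intro; omega
      · have := good_head_tail hb z hz
        rw [if_neg]; simp only [not_and] at this ⊢; intro; omega

-- B's retire-and-scan loop computes the same pairwise sum
theorem altLoop_eq (as' bs : List (Int × Int)) (ha : Good as') (hb : Good bs) :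
    altLoop as' bs = pairSum as' bs := by
  induction as' generalizing bs with
  | nil => rfl
  | cons x xs ih =>
    obtain ⟨s, e⟩ := x
    rw [altLoop]
    have hsplit : List.takeWhile (fun y : Int × Int => y.2 ≤ s) bs
        ++ List.dropWhile (fun y : Int × Int => y.2 ≤ s) bs = bs :=
      List.takeWhile_append_dropWhile
    have hgood' : Good (List.dropWhile (fun y : Int × Int => y.2 ≤ s) bs) :=
      List.IsChain.suffix hb (List.dropWhile_suffix _)
    have htake : ∀ y ∈ List.takeWhile (fun y : Int × Int => y.2 ≤ s) bs, y.2 ≤ s := by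
      intro y hy
      have := List.mem_takeWhile_imp hy
      simpa using this
    rw [rowScan_eq s e _ hgood', ih _ ha.tail hgood']
    have h1 : rowSum (s, e) bs
        = rowSum (s, e) (List.dropWhile (fun y : Int × Int => y.2 ≤ s) bs) := by
      conv_lhs => rw [← hsplit]
      rw [rowSum_append]
      have : rowSum (s, e) (List.takeWhile (fun y : Int × Int => y.2 ≤ s) bs) = 0 := by
        apply rowSum_zero
        intro y hy
        have := htake y hy
        unfold contrib
        rw [if_neg]
        simp only [not_and]
        intro
        omega
      omega
    have h2 : pairSum xs bs
        = pairSum xs (List.dropWhile (fun y : Int × Int => y.2 ≤ s) bs) := by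
      conv_lhs => rw [← hsplit]
      rw [pairSum_append_right]
      have : pairSum xs (List.takeWhile (fun y : Int × Int => y.2 ≤ s) bs) = 0 := by
        apply List.sum_eq_zero
        intro z hz
        obtain ⟨x, hx, rfl⟩ := List.mem_map.mp hz
        apply rowSum_zero
        intro y hy
        have hy2 := htake y hy
        have hx1 := good_head_tail ha x hx
        unfold contrib
        rw [if_neg]
        simp only [not_and]
        intro
        omega
      omega
    rw [pairSum_cons, ← h1, ← h2]

-- ===== VERDICT (by name: the statement is the Claim_ definition above) =====
theorem overlap_bp_spec : Claim_equal_overlap_bp := by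
  intro a b _
  show overlap_bp a b = overlap_bp_alt a b
  unfold overlap_bp overlap_bp_alt
  rw [owLoop_eq _ _ _ (good_merge a) (good_merge b), merge_eq_coalesce, merge_eq_coalesce]
  rw [altLoop_eq _ _ (by rw [← merge_eq_coalesce]; exact good_merge a)
      (by rw [← merge_eq_coalesce]; exact good_merge b)]
  simp
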